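-- pv_equiv track=rewrite | github.com/jay-ng-mc/AiPartB | source/xXminecraftEmperorsXx/player.py | snapshot
-- ===== SOURCE A (Python) =====
-- def snapshot(board):
--     red_pieces = tuple(piece for piece, color in board.items() if color == "r")
--     green_pieces = tuple(piece for piece, color in board.items() if color == "g")
--     blue_pieces = tuple(piece for piece, color in board.items() if color == "b")
--     player_pieces = {
--         "r": red_pieces,
--         "g": green_pieces,
--         "b": blue_pieces
--     }
--     return player_pieces
-- ===== SOURCE B (Python) =====
-- def snapshot(board):
--     # One pass over the items, grouping into three accumulators.
--     r, g, b = [], [], []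
--     for piece, color in board.items():
--         if color == "r":
--             r.append(piece)
--         elif color == "g":
--             g.append(piece)
--         elif color == "b":
--             b.append(piece)
--     return {"r": tuple(r), "g": tuple(g), "b": tuple(b)}
-- ===== Notes on version B (the rewrite author's own statement) =====
-- stated objective: alternative
-- what changed: B groups the pieces in a single pass over board.items() with three accumulator lists instead of A's three separate full scans (one generator expression per color).
import Mathlib
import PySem

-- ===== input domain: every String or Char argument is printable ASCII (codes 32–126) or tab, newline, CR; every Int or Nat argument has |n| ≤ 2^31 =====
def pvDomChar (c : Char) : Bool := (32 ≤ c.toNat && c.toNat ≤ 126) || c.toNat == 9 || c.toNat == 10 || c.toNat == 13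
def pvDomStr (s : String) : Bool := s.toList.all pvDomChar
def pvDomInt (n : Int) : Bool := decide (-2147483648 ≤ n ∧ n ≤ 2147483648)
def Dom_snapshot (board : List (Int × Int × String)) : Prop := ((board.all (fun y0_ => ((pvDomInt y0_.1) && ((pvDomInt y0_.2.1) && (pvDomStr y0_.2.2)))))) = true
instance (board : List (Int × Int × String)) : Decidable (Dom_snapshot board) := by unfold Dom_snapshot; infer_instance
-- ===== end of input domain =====

-- B groups the pieces in ONE pass over the items with three accumulators, instead of A's
-- three separate full scans (one per color).  Equivalence is proved for all inputs.

-- ===== PORT A =====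
-- A iterates board.items() three times, filtering by color each time.
def snapshot (board : List (Int × Int × String)) : List (String × List (Int × Int)) :=
  let d : PySem.Dict (Int × Int) String :=
    PySem.Dict.ofList (board.map (fun t => ((t.1, t.2.1), t.2.2)))
  let red_pieces := (d.items.filter (fun p => p.2 == "r")).map (fun p => p.1)
  let green_pieces := (d.items.filter (fun p => p.2 == "g")).map (fun p => p.1)
  let blue_pieces := (d.items.filter (fun p => p.2 == "b")).map (fun p => p.1)
  [("r", red_pieces), ("g", green_pieces), ("b", blue_pieces)]

-- ===== PORT B =====
def snapshotStep (acc : List (Int × Int) × List (Int × Int) × List (Int × Int))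
    (p : (Int × Int) × String) : List (Int × Int) × List (Int × Int) × List (Int × Int) :=
  if p.2 == "r" then (acc.1 ++ [p.1], acc.2.1, acc.2.2)
  else if p.2 == "g" then (acc.1, acc.2.1 ++ [p.1], acc.2.2)
  else if p.2 == "b" then (acc.1, acc.2.1, acc.2.2 ++ [p.1])
  else acc

def snapshot_alt (board : List (Int × Int × String)) : List (String × List (Int × Int)) :=
  let d : PySem.Dict (Int × Int) String :=
    PySem.Dict.ofList (board.map (fun t => ((t.1, t.2.1), t.2.2)))
  let acc := d.items.foldl snapshotStep ([], [], [])
  [("r", acc.1), ("g", acc.2.1), ("b", acc.2.2)]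

-- ===== PRECONDITION & SPEC =====
def Spec_snapshot (board : List (Int × Int × String)) (out : List (String × List (Int × Int))) : Prop := out = snapshot_alt board
instance (board : List (Int × Int × String)) (out : List (String × List (Int × Int))) : Decidable (Spec_snapshot board out) := by unfold Spec_snapshot; infer_instance

-- ===== CLAIM (what is proved, stated in full; the proofs are below) =====
def Claim_equal_snapshot : Prop := ∀ (board : List (Int × Int × String)), Dom_snapshot board → Spec_snapshot board (snapshot board)

-- ===== LEMMAS AND PROOFS =====
theorem snapshotStep_foldl (l : List ((Int × Int) × String))
    (acc : List (Int × Int) × List (Int × Int) × List (Int × Int)) :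
    l.foldl snapshotStep acc =
      (acc.1 ++ (l.filter (fun p => p.2 == "r")).map (fun p => p.1),
       acc.2.1 ++ (l.filter (fun p => p.2 == "g")).map (fun p => p.1),
       acc.2.2 ++ (l.filter (fun p => p.2 == "b")).map (fun p => p.1)) := by
  induction l generalizing acc with
  | nil => simp
  | cons h t ih =>
      simp only [List.foldl_cons, ih, snapshotStep]
      by_cases hr : h.2 == "r" <;> by_cases hg : h.2 == "g" <;> by_cases hb : h.2 == "b" <;>
        simp_all

-- ===== VERDICT (by name: the statement is the Claim_ definition above) =====
theorem snapshot_spec : Claim_equal_snapshot := by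
  intro board _
  unfold Spec_snapshot snapshot snapshot_alt
  simp only [snapshotStep_foldl]
  simp
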